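-- pv_equiv track=rewrite | github.com/GramosTV/matura2023 | matura.py | binaryBlockSumStr
-- ===== SOURCE A (Python) =====
-- def binaryBlockSumStr(n: str):
--     arr = [*n]
--     currentValue = ''
--     sum = 0
--     for x in arr:
--         if x != currentValue:
--             sum += 1
--             currentValue = x
--     return sum
-- ===== SOURCE B (Python) =====
-- def binaryBlockSumStr(n: str):
--     # divide and conquer: runs(left+right) = runs(left) + runs(right),
--     # minus one when the boundary characters match (two runs merge)
--     if len(n) <= 1:
--         return len(n)
--     m = len(n) // 2
--     left, right = n[:m], n[m:]
--     return binaryBlockSumStr(left) + binaryBlockSumStr(right) - (left[-1] == right[0])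
-- ===== Notes on version B (the rewrite author's own statement) =====
-- stated objective: alternative
-- what changed: Replaces the left-to-right sentinel scan with a divide-and-conquer recursion that counts runs in each half and merges by subtracting 1 when the boundary characters of the halves are equal.
import Mathlib
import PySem

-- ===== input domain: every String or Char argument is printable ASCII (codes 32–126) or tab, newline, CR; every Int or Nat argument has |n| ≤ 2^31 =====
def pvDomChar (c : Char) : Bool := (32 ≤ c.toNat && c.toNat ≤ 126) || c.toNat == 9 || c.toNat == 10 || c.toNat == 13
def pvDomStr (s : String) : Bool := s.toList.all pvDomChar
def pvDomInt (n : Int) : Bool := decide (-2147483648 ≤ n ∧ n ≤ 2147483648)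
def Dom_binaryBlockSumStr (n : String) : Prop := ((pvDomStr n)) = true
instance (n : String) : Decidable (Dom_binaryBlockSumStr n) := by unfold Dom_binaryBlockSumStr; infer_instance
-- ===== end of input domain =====

-- B counts runs by divide and conquer (split in half, merge boundary) instead of A's sentinel scan; same values on all inputs.

-- ===== PORT A =====
-- A's loop over the characters: currentValue starts as '' (matches no char), so it is
-- ported as Option Char with none initially; 'x != currentValue' is 'some x ≠ cv'.
def binaryBlockSumStrLoop : List Char → Option Char → Int → Int
  | [], _, s => s
  | x :: t, cv, s =>
      if some x ≠ cv then binaryBlockSumStrLoop t (some x) (s + 1)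
      else binaryBlockSumStrLoop t cv s

def binaryBlockSumStr (n : String) : Int :=
  binaryBlockSumStrLoop n.toList none 0

-- ===== PORT B =====
-- Source B's recursion on the character list: len(n)//2 is Nat division on a nonnegative
-- length (exact for Python's //); n[:m]/n[m:] are take/drop; left[-1] and
-- right[0] are getLast!/head! (exact here since both halves are nonempty in that branch).
def runsDC (l : List Char) : Int :=
  if l.length ≤ 1 then (l.length : Int)
  else
    let m := l.length / 2
    let left := l.take m
    let right := l.drop m
    runsDC left + runsDC right + (if left.getLast! = right.head! then -1 else 0)
termination_by l.length
decreasing_by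
  · simp only [List.length_take]; omega
  · simp only [List.length_drop]; omega

def binaryBlockSumStr_alt (n : String) : Int :=
  runsDC n.toList

-- ===== PRECONDITION & SPEC =====
def Spec_binaryBlockSumStr (n : String) (out : Int) : Prop := out = binaryBlockSumStr_alt n
instance (n : String) (out : Int) : Decidable (Spec_binaryBlockSumStr n out) := by unfold Spec_binaryBlockSumStr; infer_instance

-- ===== CLAIM (what is proved, stated in full; the proofs are below) =====
def Claim_equal_binaryBlockSumStr : Prop := ∀ (n : String), Dom_binaryBlockSumStr n → Spec_binaryBlockSumStr n (binaryBlockSumStr n)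

-- ===== LEMMAS AND PROOFS =====

-- proof-only reference count: one per maximal run of equal adjacent characters
def groupCount : List Char → Int
  | [] => 0
  | [_] => 1
  | a :: b :: t => (if a = b then 0 else 1) + groupCount (b :: t)

theorem loop_eq_groupCount (t : List Char) : ∀ (c : Char) (s : Int),
    binaryBlockSumStrLoop t (some c) s + 1 = s + groupCount (c :: t) := by
  induction t with
  | nil => intro c s; simp [binaryBlockSumStrLoop, groupCount]
  | cons b t' ih =>
      intro c s
      by_cases h : b = c
      · subst h
        have h1 : binaryBlockSumStrLoop (b :: t') (some b) s
            = binaryBlockSumStrLoop t' (some b) s := by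
          simp [binaryBlockSumStrLoop]
        have h2 : groupCount (b :: b :: t') = groupCount (b :: t') := by
          simp [groupCount]
        rw [h1, h2, ih b s]
      · have h1 : binaryBlockSumStrLoop (b :: t') (some c) s
            = binaryBlockSumStrLoop t' (some b) (s + 1) := by
          simp [binaryBlockSumStrLoop, h]
        have h2 : groupCount (c :: b :: t') = 1 + groupCount (b :: t') := by
          simp [groupCount, Ne.symm h]
        rw [h1, h2]
        have := ih b (s + 1)
        omega

-- concatenation of two nonempty lists: counts add, minus 1 if the boundary chars match
theorem gc_append : ∀ (a b : List Char), a ≠ [] → b ≠ [] →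
    groupCount (a ++ b)
      = groupCount a + groupCount b + (if a.getLast! = b.head! then -1 else 0) := by
  intro a
  induction a with
  | nil => intro b h; exact absurd rfl h
  | cons x a' ih =>
      intro b _ hb
      cases b with
      | nil => exact absurd rfl hb
      | cons y bs =>
          cases a' with
          | nil =>
              simp only [List.cons_append, List.nil_append, List.getLast!,
                List.head!]
              show groupCount (x :: y :: bs) = _
              simp only [groupCount]
              split_ifs with h <;> simp_all
          | cons z a'' =>
              have hne : (z :: a'') ≠ ([] : List Char) := by simp
              have hstep := ih (y :: bs) hne (by simp)
              have hL1 : groupCount (x :: z :: a'' ++ y :: bs)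
                  = (if x = z then 0 else 1) + groupCount (z :: a'' ++ y :: bs) := by
                simp [groupCount]
              have hL2 : groupCount (x :: z :: a'')
                  = (if x = z then 0 else 1) + groupCount (z :: a'') := by
                simp [groupCount]
              have hlast : (x :: z :: a'').getLast! = (z :: a'').getLast! := by
                simp [List.getLast!]
              rw [List.cons_append] at hL1 ⊢
              rw [hL1, hstep, hL2, hlast]
              ring

theorem runsDC_eq_groupCount (l : List Char) : runsDC l = groupCount l := by
  induction l using runsDC.induct with
  | case1 l h =>
      rw [runsDC]
      simp only [h, if_pos]
      match l, h with
      | [], _ => simp [groupCount]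
      | [x], _ => simp [groupCount]
  | case2 l h m left right ih1 ih2 =>
      rw [runsDC]
      simp only [h, if_false]
      have hlen : 2 ≤ l.length := by omega
      have hm1 : 1 ≤ m := by simp only [m]; omega
      have hm2 : m < l.length := by simp only [m]; omega
      have hleft : left ≠ [] := by
        simp only [left, ← List.length_pos_iff, List.length_take]; omega
      have hright : right ≠ [] := by
        simp only [right, ← List.length_pos_iff, List.length_drop]; omega
      have hcat : left ++ right = l := List.take_append_drop m l
      have hg : groupCount l
          = groupCount left + groupCount right
            + (if left.getLast! = right.head! then -1 else 0) := by
        rw [← hcat]; exact gc_append left right hleft hright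
      rw [ih1, ih2, hg]

-- ===== VERDICT (by name: the statement is the Claim_ definition above) =====
theorem binaryBlockSumStr_spec : Claim_equal_binaryBlockSumStr := by
  intro n _
  unfold Spec_binaryBlockSumStr binaryBlockSumStr binaryBlockSumStr_alt
  rw [runsDC_eq_groupCount]
  cases h : n.toList with
  | nil => simp [binaryBlockSumStrLoop, groupCount]
  | cons x t =>
      have h1 : binaryBlockSumStrLoop (x :: t) none 0
          = binaryBlockSumStrLoop t (some x) 1 := by
        simp [binaryBlockSumStrLoop]
      have := loop_eq_groupCount t x 1
      rw [h1]
      omega
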